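-- pv_equiv track=rewrite | github.com/fedotov2a/TSU | Crypto/5/lib/saes.py | gf_mi
-- ===== SOURCE A (Python) =====
-- def gf_multiply_modular(a, b, mod, n):
--     """
--     INPUTS
--     a - полином (множимое)
--     b - полином (множитель)
--     mod - неприводимый полином
--     n - порядок неприводимого полинома
--     OUTPUTS:
--     product - результат перемножения двух полиномов a и b
--     """
--     # маска для наиболее значимого бита в слове
--     msb = 2**(n - 1)
--     # маска на все биты
--     mask = 2**n - 1
--     # r(x) = x^n mod m(x)
--     r = mod ^ (2**n)
--     product = 0 # результат умножения
--     mm = 1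
--     for i in range(n):
--         if b & mm > 0:
--             # если у множителя текущий бит 1
--             product ^= a
--         # выполняем последовательное умножение на х
--         if a & msb == 0:
--             # если старший бит 0, то просто сдвигаем на 1 бит
--             a <<= 1
--         else:
--             # если старший бит 1, то сдвиг на 1 бит
--             a <<= 1
--             # и сложение по модулю 2 с r(x)
--             a ^= r
--             # берем только n бит
--             a &= mask
--         # формируем маску для получения очередного бита в множителе
--         mm += mm
--     return product
--
-- def gf_divide(a, b):
--     # деление полинома на полином
--     # результат: частное, остаток (полиномы)
--     dividend = a # делимое
--     divisor = b # делитель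
--     a = 0
--     # бит в делимом
--     m = len(bin(dividend))-2
--     # бит в делителе
--     n = len(bin(divisor))-2
--     s = divisor << m
--     msb = 2 ** (m + n - 1)
--     for i in range(m):
--         dividend <<= 1
--         if dividend & msb > 0:
--             dividend ^= s
--             dividend ^= 1
--     maskq = 2**m - 1
--     maskr = 2**n - 1
--     r = (dividend >> m) & maskr
--     q = dividend & maskq
--
--     return q, r
--
-- def gf_mi(b, m, n):
--     """
--     INPUTS
--     b (integer)– полином, для которого надо найти обратное по умножению
--     m (integer) – неприводимый полином
--     n (integer)- порядок неприводимого полинома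
--     OUTPUTS:
--     b2 (integer) – полином, обратный по умножению к b
--     """
--
--     # if gcd(b, m) != 1:
--     #     return None
--
--     a1, a2, a3 = 1, 0, m
--     b1, b2, b3 = 0, 1, b
--
--     while b3 != 1:
--         q, r = gf_divide(a3, b3)
--         t1, t2, t3 = a1 ^ gf_multiply_modular(q, b1, m, n), a2 ^ gf_multiply_modular(q, b2, m, n), r
--         a1, a2, a3 = b1, b2, b3
--         b1, b2, b3 = t1, t2, t3
--
--     return b2
-- ===== SOURCE B (Python) =====
-- def gf_divide(a, b):
--     # shared module helper, kept exactly as in the original module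
--     dividend = a
--     divisor = b
--     a = 0
--     m = len(bin(dividend)) - 2
--     n = len(bin(divisor)) - 2
--     s = divisor << m
--     msb = 2 ** (m + n - 1)
--     for i in range(m):
--         dividend <<= 1
--         if dividend & msb > 0:
--             dividend ^= s
--             dividend ^= 1
--     maskq = 2**m - 1
--     maskr = 2**n - 1
--     r = (dividend >> m) & maskr
--     q = dividend & maskq
--     return q, r
--
--
-- def _xtime(a, r, msb, mask):
--     # multiply a polynomial by x modulo the reduction polynomial
--     if a & msb == 0:
--         return a << 1
--     return ((a << 1) ^ r) & mask
--
--
-- def gf_multiply_modular(a, b, mod, n):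
--     # staged version: first build the chain a, x*a, x^2*a, ..., then
--     # xor together the chain entries selected by the bits of b
--     msb = 2 ** (n - 1)
--     mask = 2**n - 1
--     r = mod ^ (2**n)
--     chain = []
--     for _ in range(n):
--         chain.append(a)
--         a = _xtime(a, r, msb, mask)
--     product = 0
--     mm = 1
--     for s in chain:
--         if b & mm > 0:
--             product ^= s
--         mm += mm
--     return product
--
--
-- def gf_mi(b, m, n):
--     # Two phases: a plain Euclidean pass collecting only the quotients,
--     # then a fold over them building the single Bezout coefficient returned.
--     qs = []
--     a3, b3 = m, b
--     while b3 != 1: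
--         q, r = gf_divide(a3, b3)
--         qs.append(q)
--         a3, b3 = b3, r
--     x, y = 0, 1
--     for q in qs:
--         x, y = y, x ^ gf_multiply_modular(q, y, m, n)
--     return y
-- ===== Notes on version B (the rewrite author's own statement) =====
-- stated objective: alternative
-- what changed: A's single extended-Euclidean loop carrying a 6-tuple (two Bezout columns updated in lockstep with the remainders, each step calling a monolithic bit-interleaved field multiply) becomes a quotient-collecting Euclidean pass followed by a fold building the one returned coefficient, and the field multiplication itself is restaged as a precomputed x-multiple chain followed by an xor-fold over the multiplier's bits.
import Mathlib
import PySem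

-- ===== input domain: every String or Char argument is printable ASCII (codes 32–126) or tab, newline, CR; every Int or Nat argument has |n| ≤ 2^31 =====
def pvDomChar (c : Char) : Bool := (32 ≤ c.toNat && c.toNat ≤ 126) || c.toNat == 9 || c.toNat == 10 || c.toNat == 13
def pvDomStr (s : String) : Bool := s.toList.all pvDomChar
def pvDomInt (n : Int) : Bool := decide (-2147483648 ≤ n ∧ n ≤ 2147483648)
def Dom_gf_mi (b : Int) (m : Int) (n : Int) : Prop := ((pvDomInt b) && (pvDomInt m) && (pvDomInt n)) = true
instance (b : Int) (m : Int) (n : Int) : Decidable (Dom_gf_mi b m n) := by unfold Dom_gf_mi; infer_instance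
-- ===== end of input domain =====

-- B restructures A's one-loop extended Euclid (6-tuple state, two Bezout columns) into a
-- quotient-collecting pass plus a fold building the single returned coefficient, and restages
-- the field multiply as an x-multiple chain followed by an xor-fold (objective: alternative).


-- ===== PORT A =====
-- len(bin(x)) - 2 (exact: counts the '-' sign character for negative x, and bin(0) = '0b0');
-- shared module helper gf_divide used verbatim by both A's and B's Python
def binLen (x : Int) : Nat :=
  if x < 0 then PySem.Int.bitLength x + 1 else if x = 0 then 1 else PySem.Int.bitLength x

def gf_div_loop (s msbI : Int) : Nat → Int → Int
  | 0, dividend => dividend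
  | k+1, dividend =>
    let dividend := dividend * 2
    let dividend := if PySem.Int.band dividend msbI > 0
                    then PySem.Int.bxor (PySem.Int.bxor dividend s) 1 else dividend
    gf_div_loop s msbI k dividend

def gf_divide (a b : Int) : Int × Int :=
  let mb := binLen a
  let nb := binLen b
  let s := b * 2 ^ mb
  let msbI : Int := 2 ^ (mb + nb - 1)
  let dividend := gf_div_loop s msbI mb a
  let maskq : Int := 2 ^ mb - 1
  let maskr : Int := 2 ^ nb - 1
  let r := PySem.Int.band (PySem.Int.floordiv dividend (2 ^ mb)) maskr
  let q := PySem.Int.band dividend maskq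
  (q, r)

-- A's gf_multiply_modular: one loop interleaving the product xor, the x-multiplication of a
-- and the mask doubling in a single 3-part state
def gf_mul_loop (bb r msb mask : Int) : Nat → Int → Int → Int → Int
  | 0, _, product, _ => product
  | k+1, a, product, mm =>
    let product := if PySem.Int.band bb mm > 0 then PySem.Int.bxor product a else product
    let a := if PySem.Int.band a msb = 0 then a * 2
             else PySem.Int.band (PySem.Int.bxor (a * 2) r) mask
    gf_mul_loop bb r msb mask k a product (mm + mm)

-- Python computes msb = 2**(n-1) as a float when n ≤ 0 but never uses it then (range(n) is
-- empty); mod ^ (2**n) raises TypeError for n < 0 — excluded by Pre_ (toNat exponents are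
-- exact for the admitted n ≥ 0, and for n ≤ 0 the loop body is never entered).
def gf_multiply_modular (a b mod n : Int) : Int :=
  let msb : Int := 2 ^ (n - 1).toNat
  let mask : Int := 2 ^ n.toNat - 1
  let r : Int := PySem.Int.bxor mod (2 ^ n.toNat)
  gf_mul_loop b r msb mask n.toNat a 0 1

-- A's 'while b3 != 1' loop; the fuel argument only makes the recursion total
-- (Python diverges where it would run out, and nothing is claimed about the value there).
def gf_mi_loop (m n : Int) : Nat → Int × Int × Int → Int × Int × Int → Int
  | 0, _, (_, b2, _) => b2
  | fuel+1, (a1, a2, a3), (b1, b2, b3) =>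
    if b3 = 1 then b2
    else
      let qr := gf_divide a3 b3
      let t1 := PySem.Int.bxor a1 (gf_multiply_modular qr.1 b1 m n)
      let t2 := PySem.Int.bxor a2 (gf_multiply_modular qr.1 b2 m n)
      gf_mi_loop m n fuel (b1, b2, b3) (t1, t2, qr.2)

def gf_mi (b : Int) (m : Int) (n : Int) : Int :=
  gf_mi_loop m n 1000000 (1, 0, m) (0, 1, b)

-- ===== PORT B =====
-- Source B's _xtime helper: multiply a polynomial by x modulo the reduction polynomial
def gf_xtime (r msb mask a : Int) : Int :=
  if PySem.Int.band a msb = 0 then a * 2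
  else PySem.Int.band (PySem.Int.bxor (a * 2) r) mask

-- Source B's first multiply phase: the chain a, x*a, x^2*a, … (n entries)
def gf_chain (r msb mask : Int) : Nat → Int → List Int
  | 0, _ => []
  | k+1, a => a :: gf_chain r msb mask k (gf_xtime r msb mask a)

-- Source B's second multiply phase: 'for s in chain: if b & mm > 0: product ^= s; mm += mm'
def gf_xorfold (bb : Int) : List Int → Int → Int → Int
  | [], product, _ => product
  | s :: ss, product, mm =>
    gf_xorfold bb ss (if PySem.Int.band bb mm > 0 then PySem.Int.bxor product s else product)
      (mm + mm)

def gf_multiply_modular_alt (a b mod n : Int) : Int :=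
  let msb : Int := 2 ^ (n - 1).toNat
  let mask : Int := 2 ^ n.toNat - 1
  let r : Int := PySem.Int.bxor mod (2 ^ n.toNat)
  gf_xorfold b (gf_chain r msb mask n.toNat a) 0 1

-- phase 1 of Source B's gf_mi: the quotient-collecting 'while b3 != 1' pass (same fuel guard as A)
def gf_quotients : Nat → Int → Int → List Int
  | 0, _, _ => []
  | fuel+1, a3, b3 =>
    if b3 = 1 then []
    else
      let qr := gf_divide a3 b3
      qr.1 :: gf_quotients fuel b3 qr.2

-- phase 2 of Source B's gf_mi: 'for q in qs: x, y = y, x ^ gf_multiply_modular(q, y, m, n)'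
def gf_backsub (m n : Int) : List Int → Int → Int → Int
  | [], _, y => y
  | q :: qs, x, y => gf_backsub m n qs y (PySem.Int.bxor x (gf_multiply_modular_alt q y m n))

def gf_mi_alt (b : Int) (m : Int) (n : Int) : Int :=
  gf_backsub m n (gf_quotients 1000000 m b) 0 1

-- ===== PRECONDITION & SPEC =====
-- Pre_ excludes exactly the inputs on which A raises: for n < 0 Python's 2**n is a float and
-- 'mod ^ (2**n)' in gf_multiply_modular raises TypeError as soon as the Euclidean loop body
-- runs, i.e. whenever b ≠ 1.
def Pre_gf_mi (b : Int) (m : Int) (n : Int) : Prop := 0 ≤ n ∨ b = 1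

instance (b : Int) (m : Int) (n : Int) : Decidable (Pre_gf_mi b m n) := by
  unfold Pre_gf_mi; infer_instance

def pvWitness_gf_mi : Int × Int × Int := (7, 19, 4)

def Spec_gf_mi (b : Int) (m : Int) (n : Int) (out : Int) : Prop := out = gf_mi_alt b m n
instance (b : Int) (m : Int) (n : Int) (out : Int) : Decidable (Spec_gf_mi b m n out) := by
  unfold Spec_gf_mi; infer_instance

-- ===== CLAIM (what is proved, stated in full; the proofs are below) =====
def Claim_equal_gf_mi : Prop :=
  ∀ (b : Int) (m : Int) (n : Int), Dom_gf_mi b m n → Pre_gf_mi b m n → Spec_gf_mi b m n (gf_mi b m n)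

-- ===== LEMMAS AND PROOFS =====
-- Fusing B's two multiply phases back into A's single loop: the xor-fold over the
-- precomputed x-multiple chain computes exactly A's interleaved loop state.
lemma xorfold_chain_eq_mul_loop (bb r msb mask : Int) :
    ∀ (k : Nat) (a product mm : Int),
      gf_xorfold bb (gf_chain r msb mask k a) product mm =
        gf_mul_loop bb r msb mask k a product mm := by
  intro k
  induction k with
  | zero => intro a product mm; simp [gf_chain, gf_xorfold, gf_mul_loop]
  | succ j ih =>
    intro a product mm
    simp only [gf_chain, gf_xorfold, gf_mul_loop, gf_xtime]
    exact ih _ _ _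

lemma mul_alt_eq (a b mod n : Int) :
    gf_multiply_modular_alt a b mod n = gf_multiply_modular a b mod n := by
  unfold gf_multiply_modular_alt gf_multiply_modular
  exact xorfold_chain_eq_mul_loop b _ _ _ n.toNat a 0 1

-- Loop invariant: A's loop only ever reads the third components (a3, b3) to drive the
-- recursion and the second-column coefficients (a2, b2) to build its result; it equals
-- B's fold of the collected quotients seeded with (a2, b2). Holds for every fuel, so in
-- particular at fuel exhaustion.
lemma gf_mi_loop_eq_backsub (m n : Int) :
    ∀ (fuel : Nat) (a1 a2 a3 b1 b2 b3 : Int),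
      gf_mi_loop m n fuel (a1, a2, a3) (b1, b2, b3) =
        gf_backsub m n (gf_quotients fuel a3 b3) a2 b2 := by
  intro fuel
  induction fuel with
  | zero => intro a1 a2 a3 b1 b2 b3; simp [gf_mi_loop, gf_quotients, gf_backsub]
  | succ k ih =>
    intro a1 a2 a3 b1 b2 b3
    by_cases h : b3 = 1
    · simp [gf_mi_loop, gf_quotients, gf_backsub, h]
    · simp only [gf_mi_loop, gf_quotients, h, if_false, gf_backsub, mul_alt_eq]
      exact ih _ _ _ _ _ _

-- ===== VERDICT (by name: the statement is the Claim_ definition above) =====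
theorem gf_mi_spec : Claim_equal_gf_mi := by
  intro b m n _ _
  unfold Spec_gf_mi gf_mi gf_mi_alt
  exact gf_mi_loop_eq_backsub m n 1000000 1 0 m 0 1 b
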